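-- pv_equiv track=rewrite | github.com/GreenJ84/Practice | LeetCodeAlgos/removeStarFromString.py | removeStars
-- ===== SOURCE A (Python) =====
-- def removeStars(s: str) -> str:
--     ans = []
--     for char in s:
--         if char == '*':
--             if ans:
--                 ans.pop()
--             continue
--         ans.append(char)
--     return ''.join(ans)
-- ===== SOURCE B (Python) =====
-- def removeStars(s: str) -> str:
--     skip = 0
--     res = []
--     for c in reversed(s):
--         if c == '*':
--             skip += 1
--         elif skip:
--             skip -= 1
--         else:
--             res.append(c)
--     return ''.join(reversed(res))
-- ===== Notes on version B (the rewrite author's own statement) =====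
-- stated objective: alternative
-- what changed: Replaces the pop-able stack built left-to-right with a right-to-left scan that keeps only an integer pending-deletion counter and conses surviving characters, reversing once at the end.
import Mathlib
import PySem

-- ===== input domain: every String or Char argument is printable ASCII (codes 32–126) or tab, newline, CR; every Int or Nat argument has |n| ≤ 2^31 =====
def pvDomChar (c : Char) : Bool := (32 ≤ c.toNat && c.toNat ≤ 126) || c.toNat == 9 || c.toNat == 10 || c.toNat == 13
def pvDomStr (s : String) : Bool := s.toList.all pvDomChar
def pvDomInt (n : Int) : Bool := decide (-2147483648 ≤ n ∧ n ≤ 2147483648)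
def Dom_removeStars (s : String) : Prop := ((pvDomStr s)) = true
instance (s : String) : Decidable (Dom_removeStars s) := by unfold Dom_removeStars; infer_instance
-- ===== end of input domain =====

-- B replaces A's pop-able stack with a right-to-left scan keeping a pending-deletion counter; same return value, no speed claim.

-- ===== PORT A =====
-- A: left-to-right loop, a list used as a stack (append char, pop on '*').
def removeStars (s : String) : String :=
  String.ofList (s.toList.foldl
    (fun ans c => if c = '*' then (if ans = [] then ans else ans.dropLast) else ans ++ [c]) [])

-- ===== PORT B =====
-- B: scan reversed(s) with a skip counter, append survivors, reverse at the end.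
def removeStarsGo : List Char → Nat → List Char → List Char
  | [], _, acc => acc
  | c :: rest, skip, acc =>
    if c = '*' then removeStarsGo rest (skip + 1) acc
    else if skip > 0 then removeStarsGo rest (skip - 1) acc
    else removeStarsGo rest skip (acc ++ [c])

def removeStars_alt (s : String) : String :=
  String.ofList ((removeStarsGo s.toList.reverse 0 []).reverse)

-- ===== PRECONDITION & SPEC =====
def Spec_removeStars (s : String) (out : String) : Prop := out = removeStars_alt s
instance (s : String) (out : String) : Decidable (Spec_removeStars s out) := by unfold Spec_removeStars; infer_instance

-- ===== CLAIM (what is proved, stated in full; the proofs are below) =====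
def Claim_equal_removeStars : Prop := ∀ (s : String), Dom_removeStars s → Spec_removeStars s (removeStars s)

-- ===== LEMMAS AND PROOFS =====
def pvStep (ans : List Char) (c : Char) : List Char :=
  if c = '*' then (if ans = [] then ans else ans.dropLast) else ans ++ [c]

def pvStack (l : List Char) : List Char := l.foldl pvStep []

lemma removeStars_eq_stack (s : String) : removeStars s = String.ofList (pvStack s.toList) := rfl

-- processing m (= the reverse of some prefix-consumed input) with pending skip k
lemma go_eq (m : List Char) : ∀ (k : Nat) (acc : List Char),
    removeStarsGo m k acc
      = acc ++ ((pvStack m.reverse).take ((pvStack m.reverse).length - k)).reverse := by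
  induction m with
  | nil => intro k acc; simp [removeStarsGo, pvStack]
  | cons c rest ih =>
    intro k acc
    have hstep : pvStack (c :: rest).reverse = pvStep (pvStack rest.reverse) c := by
      simp [pvStack, List.foldl_append]
    rw [hstep]
    set st := pvStack rest.reverse with hst
    by_cases hc : c = '*'
    · subst hc
      simp only [removeStarsGo, if_true, ih]
      by_cases hnil : st = []
      · simp [pvStep, hnil]
      · simp only [pvStep, if_true, if_neg hnil, List.dropLast_eq_take]
        congr 2
        rw [List.length_take, List.take_take]
        congr 1
        omega
    · simp only [removeStarsGo, if_neg hc]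
      have hstep' : pvStep st c = st ++ [c] := by simp [pvStep, hc]
      rw [hstep']
      by_cases hk : k > 0
      · rw [if_pos hk, ih]
        congr 2
        rw [List.take_append_of_le_length (by simp; omega)]
        congr 1
        simp; omega
      · rw [if_neg hk, ih]
        have hk0 : k = 0 := by omega
        subst hk0
        rw [Nat.sub_zero, Nat.sub_zero, List.take_of_length_le (by simp),
          List.take_of_length_le (le_refl _), List.reverse_append]
        simp
-- ===== VERDICT (by name: the statement is the Claim_ definition above) =====
theorem removeStars_spec : Claim_equal_removeStars := by
  intro s _
  show removeStars s = removeStars_alt s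
  rw [removeStars_eq_stack, removeStars_alt, go_eq]
  simp
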